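-- pv_equiv track=rewrite | github.com/theguyoverthere/CMU15-112-Spring17 | src/Week5/Practice/nQueensChecker.py | multipleQueensOnRightDiagonals
-- ===== SOURCE A (Python) =====
-- def multipleQueensOnRightDiagonals(board):
--     """
--     Check if there are queens on the board lying on a diagonal which attack
--     each other. This would happen if more than one queen lies on the same
--     diagonal on the board. The diagonal in this case would be slanting up,
--     towards the right.
--
--     :param board: An NxN 2d list consisting of 1s and 0s indicating True and
--                   False, where a True indicates a queen is present and False
--                   indicates a blank cell.
--
--     :return: True if there are more than one queen on the same diagonal,
--              slanting to the right.
--     """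
--     (rows, columns) = len(board), len(board[0])
--
--     direction = [(+1, -1), (-1, +1)]
--     start = [(0, 0), (rows - 1, 1)]
--
--     # For each diagonal half of the rectangle
--     # i.e. (top-left half, bottom-right half)
--     for i, half in enumerate([-1, +1]):
--         for column in range(columns):
--
--             count = 0
--
--             if half == -1:
--                 # As we traverse the upper left triangle, the diagonal
--                 # lengths increase as we move towards the right.
--                 diagonalLength = column + 1
--             else:
--                 # On the other hand, the diagonal lengths decrease as we
--                 # traverse the lower right half, moving towards the right.
--                 diagonalLength = columns - column
--
--             # Traverse the diagonals.
--             for d in range(diagonalLength):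
--
--                 row = start[i][0] + (d * direction[i][0])
--                 col = column + (d * direction[i][1])
--
--                 if board[row][col] == 1:
--                     count += 1
--
--             if count > 1:
--                 return True
--
--     return False
-- ===== SOURCE B (Python) =====
-- def multipleQueensOnRightDiagonals(board):
--     rows, columns = len(board), len(board[0])
--     counts = {}
--     for r in range(rows):
--         for c in range(columns):
--             if board[r][c] == 1:
--                 s = r + c
--                 counts[s] = counts.get(s, 0) + 1
--                 if counts[s] == 2:
--                     return True
--     return False
-- ===== Notes on version B (the rewrite author's own statement) =====
-- stated objective: simpler
-- what changed: Replaces A's two-half per-diagonal walking (direction vectors, per-column diagonal lengths) with one row-major pass over the cells that buckets queens by r+c in a dict and returns True as soon as any bucket reaches 2.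
-- intended difference: On boards with rows >= columns+2 where every anti-diagonal holding >=2 queens is one of the diagonals numbered columns..rows-2 (which A's two half-scans never visit), A returns False and B returns True; B's value is intended since those queens do attack each other. — e.g. on multipleQueensOnRightDiagonals([[0, 0], [0, 1], [1, 0], [0, 0]]): A returns false, B returns true
-- outside the precondition, e.g. on multipleQueensOnRightDiagonals([[0, 0], [1], [0, 0], [0, 0]]): A returns False, B raises IndexError; on multipleQueensOnRightDiagonals([[1, 2], [2, 1, 1, 1], [1], [0, 1, 0, 2, 1], [0, 0]]): A returns False, B returns True
import Mathlib
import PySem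

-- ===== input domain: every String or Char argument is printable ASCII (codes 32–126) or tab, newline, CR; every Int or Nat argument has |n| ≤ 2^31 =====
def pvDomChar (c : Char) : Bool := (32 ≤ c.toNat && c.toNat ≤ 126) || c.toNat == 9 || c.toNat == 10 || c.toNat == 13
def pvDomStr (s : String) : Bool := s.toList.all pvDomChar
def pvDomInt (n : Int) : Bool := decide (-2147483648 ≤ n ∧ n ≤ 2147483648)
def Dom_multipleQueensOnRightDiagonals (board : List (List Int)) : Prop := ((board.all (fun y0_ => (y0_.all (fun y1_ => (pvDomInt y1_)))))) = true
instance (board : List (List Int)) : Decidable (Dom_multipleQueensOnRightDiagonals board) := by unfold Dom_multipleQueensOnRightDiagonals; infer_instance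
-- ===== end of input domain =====

-- B replaces A's two-half per-diagonal walking with one row-major pass that buckets queens
-- by r+c in a dict and returns True as soon as a bucket reaches 2 (objective: simpler).

-- ===== PORT A =====
-- board[r][c]; exact for the nonnegative in-range indices A uses under Pre_
def pvA_cell (board : List (List Int)) (r c : Int) : Int :=
  PySem.List.pyGetD (PySem.List.pyGetD board r []) c 0

def multipleQueensOnRightDiagonals (board : List (List Int)) : Bool :=
  let rows : Int := board.length
  let columns : Int := (PySem.List.pyGetD board 0 []).length
  let direction : List (Int × Int) := [(1, -1), (-1, 1)]
  let start : List (Int × Int) := [(0, 0), (rows - 1, 1)]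
  (PySem.List.enumerate [(-1 : Int), 1]).any (fun ih =>
    (PySem.List.pyRange 0 columns).any (fun column =>
      let diagonalLength : Int := if ih.2 == -1 then column + 1 else columns - column
      let count : Int :=
        (PySem.List.pyRange 0 diagonalLength).foldl (fun count d =>
          let row := (PySem.List.pyGetD start ih.1 (0, 0)).1 + d * (PySem.List.pyGetD direction ih.1 (0, 0)).1
          let col := column + d * (PySem.List.pyGetD direction ih.1 (0, 0)).2
          if pvA_cell board row col == 1 then count + 1 else count) 0
      decide (1 < count)))
-- ===== PORT B =====
-- board[r][c]; exact for the nonnegative in-range indices B uses under Pre_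
def pvB_cell (board : List (List Int)) (r c : Int) : Int :=
  PySem.List.pyGetD (PySem.List.pyGetD board r []) c 0

-- the inner 'for c in range(columns)' loop: none = early 'return True', some = updated counts
def pvB_row (board : List (List Int)) (r : Int) (cols : List Int) (counts : PySem.Dict Int Int) :
    Option (PySem.Dict Int Int) :=
  match cols with
  | [] => some counts
  | c :: rest =>
    if pvB_cell board r c == 1 then
      let s := r + c
      let counts' := counts.insert s (counts.getD s 0 + 1)
      if counts'.getD s 0 == 2 then none
      else pvB_row board r rest counts'
    else pvB_row board r rest counts

-- the outer 'for r in range(rows)' loop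
def pvB_rows (board : List (List Int)) (rs : List Int) (columns : Int) (counts : PySem.Dict Int Int) : Bool :=
  match rs with
  | [] => false
  | r :: rest =>
    match pvB_row board r (PySem.List.pyRange 0 columns) counts with
    | none => true
    | some counts' => pvB_rows board rest columns counts'

def multipleQueensOnRightDiagonals_alt (board : List (List Int)) : Bool :=
  let rows : Int := board.length
  let columns : Int := (PySem.List.pyGetD board 0 []).length
  pvB_rows board (PySem.List.pyRange 0 rows) columns PySem.Dict.empty

-- ===== PRECONDITION & SPEC =====
-- helper for D_ below: queens on anti-diagonal s, i.e. cells (r, s-r) with s-r < C,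
-- row-indexed via zipIdx; independent of both ports
def pvDDiag (b : List (List Int)) (C : Nat) (s : Nat) : Nat :=
  b.zipIdx.countP fun p => decide (p.2 ≤ s ∧ s - p.2 < C) && (p.1.getD (s - p.2) 0 == 1)

-- Pre_ keeps the boards on which both programs return: nonempty, columns := len(board[0]) ≤ rows,
-- every row at least columns long.  Excluded: the empty board and wide or most ragged boards, where
-- A raises IndexError; and ragged boards with a row shorter than columns, where A may happen to
-- return a value only because its diagonal walk skips the missing cells while B, reading the whole
-- rows × columns rectangle, raises or counts cells A skipped (see the cites).
def Pre_multipleQueensOnRightDiagonals (board : List (List Int)) : Prop :=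
  board ≠ [] ∧ (board.getD 0 []).length ≤ board.length ∧
    ∀ row ∈ board, (board.getD 0 []).length ≤ row.length
instance (board : List (List Int)) : Decidable (Pre_multipleQueensOnRightDiagonals board) := by unfold Pre_multipleQueensOnRightDiagonals; infer_instance
instance (board : List (List Int)) : Decidable (Pre_multipleQueensOnRightDiagonals board) := by unfold Pre_multipleQueensOnRightDiagonals; infer_instance

def pvWitness_multipleQueensOnRightDiagonals : List (List Int) := [[0, 1], [1, 0]]

-- On boards with rows ≥ columns+2 where every anti-diagonal holding ≥2 queens (H ≠ []) is one of
-- the diagonals numbered columns..rows-2 — which A's two half-scans never visit — A returns False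
-- while B returns True; B's value is intended: those queens do attack each other.
def D_multipleQueensOnRightDiagonals (b : List (List Int)) : Prop :=
  let C := (b.getD 0 []).length
  let H := (List.range (b.length + C)).filter fun s => 2 ≤ pvDDiag b C s
  H ≠ [] ∧ ∀ s ∈ H, C ≤ s ∧ s + 2 ≤ b.length
instance (board : List (List Int)) : Decidable (D_multipleQueensOnRightDiagonals board) := by unfold D_multipleQueensOnRightDiagonals; infer_instance
instance (board : List (List Int)) : Decidable (D_multipleQueensOnRightDiagonals board) := by unfold D_multipleQueensOnRightDiagonals; infer_instance

def Spec_multipleQueensOnRightDiagonals (board : List (List Int)) (out : Bool) : Prop := ¬ D_multipleQueensOnRightDiagonals board → out = multipleQueensOnRightDiagonals_alt board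
instance (board : List (List Int)) (out : Bool) : Decidable (Spec_multipleQueensOnRightDiagonals board out) := by unfold Spec_multipleQueensOnRightDiagonals; infer_instance

def pvDiffWitness_multipleQueensOnRightDiagonals : List (List Int) := [[0, 0], [0, 1], [1, 0], [0, 0]]

def pvDiffWitnessOut_multipleQueensOnRightDiagonals : Bool × Bool := (false, true)

-- ===== CLAIM (what is proved, stated in full; the proofs are below) =====
def Claim_unchanged_multipleQueensOnRightDiagonals : Prop := ∀ (board : List (List Int)), Dom_multipleQueensOnRightDiagonals board → Pre_multipleQueensOnRightDiagonals board → Spec_multipleQueensOnRightDiagonals board (multipleQueensOnRightDiagonals board)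
def Claim_changed_multipleQueensOnRightDiagonals : Prop := Dom_multipleQueensOnRightDiagonals (pvDiffWitness_multipleQueensOnRightDiagonals) ∧ Pre_multipleQueensOnRightDiagonals (pvDiffWitness_multipleQueensOnRightDiagonals) ∧ D_multipleQueensOnRightDiagonals (pvDiffWitness_multipleQueensOnRightDiagonals) ∧ multipleQueensOnRightDiagonals (pvDiffWitness_multipleQueensOnRightDiagonals) = pvDiffWitnessOut_multipleQueensOnRightDiagonals.1 ∧ multipleQueensOnRightDiagonals_alt (pvDiffWitness_multipleQueensOnRightDiagonals) = pvDiffWitnessOut_multipleQueensOnRightDiagonals.2 ∧ pvDiffWitnessOut_multipleQueensOnRightDiagonals.1 ≠ pvDiffWitnessOut_multipleQueensOnRightDiagonals.2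
def Claim_exact_multipleQueensOnRightDiagonals : Prop := ∀ (board : List (List Int)), Dom_multipleQueensOnRightDiagonals board → Pre_multipleQueensOnRightDiagonals board → D_multipleQueensOnRightDiagonals board → multipleQueensOnRightDiagonals board ≠ multipleQueensOnRightDiagonals_alt board

-- ===== LEMMAS AND PROOFS =====

-- B's two nested loops, fused over the row-major cell list (proof-side view of port B)
def pvB_loop (board : List (List Int)) (cells : List (Int × Int)) (counts : PySem.Dict Int Int) : Bool :=
  match cells with
  | [] => false
  | rc :: rest =>
    if pvB_cell board rc.1 rc.2 == 1 then
      let s := rc.1 + rc.2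
      let counts' := counts.insert s (counts.getD s 0 + 1)
      if counts'.getD s 0 == 2 then true
      else pvB_loop board rest counts'
    else pvB_loop board rest counts

-- queens among a list of cells lying on anti-diagonal s
def pvCq (board : List (List Int)) (cells : List (Int × Int)) (s : Int) : Nat :=
  cells.countP (fun rc => decide (rc.1 + rc.2 = s) && (pvB_cell board rc.1 rc.2 == 1))

-- the same per-anti-diagonal queen count as pvDDiag, phrased over Int
def pvDiag (board : List (List Int)) (R C : Nat) (s : Int) : Nat :=
  (List.range R).countP (fun (r : Nat) =>
    decide (0 ≤ s - (r : Int)) && decide (s - (r : Int) < (C : Int)) && (pvB_cell board r (s - (r : Int)) == 1))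

lemma countP_range_single (n : Nat) (k : Int) (q : Nat → Bool) :
    (List.range n).countP (fun (c : Nat) => decide ((c : Int) = k) && q c) =
      if 0 ≤ k ∧ k < (n : Int) ∧ q k.toNat = true then 1 else 0 := by
  induction n with
  | zero => simp; omega
  | succ n ih =>
    rw [List.range_succ, List.countP_append, ih, List.countP_cons, List.countP_nil]
    by_cases hk : (n : Int) = k
    · have hk' : k.toNat = n := by omega
      rw [if_neg (by rintro ⟨_, h, _⟩; omega)]
      by_cases hq : q n = true
      · rw [if_pos (show (decide ((n : Int) = k) && q n) = true by simp [hk, hq]),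
            if_pos ⟨by omega, by push_cast; omega, by rw [hk']; exact hq⟩]
      · rw [if_neg (show ¬(decide ((n : Int) = k) && q n) = true by simp [hq]),
            if_neg (by rintro ⟨_, _, h⟩; rw [hk'] at h; exact hq h)]
    · have heq : (0 ≤ k ∧ k < ((n + 1 : Nat) : Int) ∧ q k.toNat = true)
          ↔ (0 ≤ k ∧ k < (n : Int) ∧ q k.toNat = true) := by
        constructor
        · rintro ⟨h1, h2, h3⟩; exact ⟨h1, by push_cast at h2; omega, h3⟩
        · rintro ⟨h1, h2, h3⟩; exact ⟨h1, by push_cast; omega, h3⟩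
      rw [if_neg (show ¬(decide ((n : Int) = k) && q n) = true by simp [hk]),
          if_congr heq rfl rfl]
      omega

lemma pvB_loop_iff (board : List (List Int)) (cells : List (Int × Int)) (counts : PySem.Dict Int Int)
    (hc : ∀ s, 0 ≤ counts.getD s 0 ∧ counts.getD s 0 ≤ 1) :
    pvB_loop board cells counts = true ↔ ∃ s, 2 ≤ counts.getD s 0 + (pvCq board cells s : Int) := by
  induction cells generalizing counts with
  | nil =>
    constructor
    · intro h; simp [pvB_loop] at h
    · rintro ⟨s, hs⟩
      have := (hc s).2
      simp [pvCq] at hs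
      omega
  | cons rc rest ih =>
    rw [pvB_loop]
    cases hq : (pvB_cell board rc.1 rc.2 == 1) with
    | false =>
      have hcq : ∀ s, pvCq board (rc :: rest) s = pvCq board rest s := by
        intro s; simp [pvCq, List.countP_cons, hq]
      rw [if_neg (by simp [hq]), ih counts hc]
      simp only [hcq]
    | true =>
      have hcell : pvB_cell board rc.1 rc.2 = 1 := by simpa using hq
      rw [if_pos (by simp [hq])]
      have hcq0 : pvCq board (rc :: rest) (rc.1 + rc.2) = pvCq board rest (rc.1 + rc.2) + 1 := by
        simp [pvCq, List.countP_cons, hcell]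
      have hcqne : ∀ s, s ≠ rc.1 + rc.2 → pvCq board (rc :: rest) s = pvCq board rest s := by
        intro s hs
        simp only [pvCq, List.countP_cons]
        have : (decide (rc.1 + rc.2 = s) && (pvB_cell board rc.1 rc.2 == 1)) = false := by
          simp; intro h; exact absurd h.symm hs
        rw [this]; simp
      have hget : (counts.insert (rc.1 + rc.2) (counts.getD (rc.1 + rc.2) 0 + 1)).getD (rc.1 + rc.2) 0
          = counts.getD (rc.1 + rc.2) 0 + 1 := by
        rw [PySem.Dict.getD_insert]; simp
      have hv := hc (rc.1 + rc.2)
      by_cases h1 : counts.getD (rc.1 + rc.2) 0 = 1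
      · rw [if_pos (by rw [hget, h1]; simp)]
        simp only [true_iff]
        exact ⟨rc.1 + rc.2, by rw [hcq0]; push_cast; omega⟩
      · rw [if_neg (by rw [hget]; simp; omega)]
        rw [ih _ (by
          intro s
          rw [PySem.Dict.getD_insert]
          split_ifs with hss
          · omega
          · exact hc s)]
        constructor
        · rintro ⟨s, hs⟩
          rw [PySem.Dict.getD_insert] at hs
          by_cases hss : s = rc.1 + rc.2
          · subst hss
            rw [if_pos rfl] at hs
            exact ⟨rc.1 + rc.2, by rw [hcq0]; push_cast at *; omega⟩
          · rw [if_neg hss] at hs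
            exact ⟨s, by rw [hcqne s hss]; omega⟩
        · rintro ⟨s, hs⟩
          refine ⟨s, ?_⟩
          rw [PySem.Dict.getD_insert]
          by_cases hss : s = rc.1 + rc.2
          · subst hss
            rw [if_pos rfl]
            rw [hcq0] at hs
            push_cast at *; omega
          · rw [if_neg hss, ← hcqne s hss]
            omega

lemma pvCq_grid (board : List (List Int)) (R C : Nat) (s : Int) :
    pvCq board ((PySem.List.pyRange 0 (R : Int)).flatMap
        (fun r => (PySem.List.pyRange 0 (C : Int)).map (fun c => (r, c)))) s
      = pvDiag board R C s := by
  unfold pvCq pvDiag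
  rw [PySem.List.pyRange_zero_natCast, PySem.List.pyRange_zero_natCast, List.countP_flatMap, List.map_map,
      ← PySem.List.sum_map_ite_one_zero_nat]
  refine congrArg List.sum (List.map_congr_left ?_)
  intro r _
  simp only [Function.comp_apply, List.map_map, List.countP_map]
  have hfun : ((fun rc : Int × Int => decide (rc.1 + rc.2 = s) && (pvB_cell board rc.1 rc.2 == 1)) ∘
      ((fun c : Int => ((r : Int), c)) ∘ fun k : Nat => (k : Int)))
      = fun (c : Nat) => decide ((c : Int) = s - r) && (pvB_cell board r c == 1) := by
    funext c
    simp only [Function.comp_apply]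
    congr 1
    exact decide_eq_decide.mpr (by omega)
  rw [hfun, countP_range_single C (s - r) (fun c => pvB_cell board r c == 1)]
  by_cases h : (decide (0 ≤ s - (r : Int)) && decide (s - (r : Int) < (C : Int)) && (pvB_cell board r (s - (r : Int)) == 1)) = true
  · rw [if_pos h]
    simp only [Bool.and_eq_true, decide_eq_true_eq] at h
    rw [if_pos ⟨h.1.1, h.1.2, by rw [(by omega : ((s - (r : Int)).toNat : Int) = s - r)]; exact h.2⟩]
  · rw [if_neg h, if_neg ?_]
    rintro ⟨h1, h2, h3⟩
    exact h (by
      simp only [Bool.and_eq_true, decide_eq_true_eq]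
      exact ⟨⟨h1, h2⟩, by rw [(by omega : s - (r : Int) = ((s - (r : Int)).toNat : Int))]; exact h3⟩)

lemma pvB_fuse_row (board : List (List Int)) (r : Int) :
    ∀ (cols : List Int) (counts : PySem.Dict Int Int) (cells : List (Int × Int)),
      pvB_loop board (cols.map (fun c => (r, c)) ++ cells) counts =
        (match pvB_row board r cols counts with
          | none => true
          | some d => pvB_loop board cells d) := by
  intro cols
  induction cols with
  | nil => intro counts cells; rfl
  | cons c rest ih =>
    intro counts cells
    show pvB_loop board ((r, c) :: (rest.map (fun c => (r, c)) ++ cells)) counts = _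
    rw [pvB_loop, pvB_row]
    cases hq : (pvB_cell board r c == 1) with
    | false => simp only [Bool.false_eq_true, if_false]; exact ih counts cells
    | true =>
      simp only [if_true]
      cases h2 : ((counts.insert (r + c) (counts.getD (r + c) 0 + 1)).getD (r + c) 0 == 2) with
      | false => simp only [Bool.false_eq_true, if_false]; exact ih _ cells
      | true => simp only [if_true]

lemma pvB_fuse_rows (board : List (List Int)) (columns : Int) :
    ∀ (rs : List Int) (counts : PySem.Dict Int Int),
      pvB_rows board rs columns counts =
        pvB_loop board
          (rs.flatMap (fun r => (PySem.List.pyRange 0 columns).map (fun c => (r, c)))) counts := by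
  intro rs
  induction rs with
  | nil => intro counts; rfl
  | cons r rest ih =>
    intro counts
    rw [pvB_rows, List.flatMap_cons, pvB_fuse_row board r (PySem.List.pyRange 0 columns) counts]
    cases pvB_row board r (PySem.List.pyRange 0 columns) counts with
    | none => rfl
    | some d => exact ih d

lemma alt_iff (board : List (List Int)) :
    multipleQueensOnRightDiagonals_alt board = true ↔
      ∃ s, 2 ≤ pvDiag board board.length (PySem.List.pyGetD board 0 []).length s := by
  simp only [multipleQueensOnRightDiagonals_alt]
  rw [pvB_fuse_rows board _ (PySem.List.pyRange 0 (board.length : Int)) PySem.Dict.empty,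
      pvB_loop_iff board _ PySem.Dict.empty (fun s => by rw [PySem.Dict.getD_empty]; omega)]
  constructor
  · rintro ⟨s, hs⟩
    rw [PySem.Dict.getD_empty, pvCq_grid board board.length (PySem.List.pyGetD board 0 []).length s] at hs
    exact ⟨s, by omega⟩
  · rintro ⟨s, hs⟩
    refine ⟨s, ?_⟩
    rw [PySem.Dict.getD_empty, pvCq_grid board board.length (PySem.List.pyGetD board 0 []).length s]
    omega

lemma diag_low (board : List (List Int)) (R C m : Nat) (hm : m < C) (hCR : C ≤ R) :
    (List.range (m + 1)).countP (fun (d : Nat) => pvB_cell board d ((m : Int) - d) == 1)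
      = pvDiag board R C (m : Int) := by
  unfold pvDiag
  rw [show List.range R = List.range (m + 1) ++ (List.range (R - (m + 1))).map ((m + 1) + ·) from by
        rw [← List.range_add]; congr 1; omega,
      List.countP_append, List.countP_map]
  have h2 : (List.range (R - (m + 1))).countP
      ((fun (r : Nat) => decide (0 ≤ (m : Int) - (r : Int)) && decide ((m : Int) - (r : Int) < (C : Int)) && (pvB_cell board r ((m : Int) - (r : Int)) == 1)) ∘ (fun x => (m + 1) + x)) = 0 := by
    rw [List.countP_eq_zero]
    intro a _
    simp only [Function.comp_apply, Bool.and_eq_true, decide_eq_true_eq, not_and]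
    intro h; exfalso; push_cast at h; omega
  rw [h2, Nat.add_zero]
  apply List.countP_congr
  intro d hd
  rw [List.mem_range] at hd
  simp only [Bool.and_eq_true, decide_eq_true_eq]
  constructor
  · intro h; exact ⟨⟨by omega, by push_cast; omega⟩, h⟩
  · rintro ⟨_, h⟩; exact h

lemma diag_high (board : List (List Int)) (R C m : Nat) (hm : m < C) (hCR : C ≤ R) :
    (List.range (C - m)).countP (fun (d : Nat) => pvB_cell board ((R : Int) - 1 - d) ((m : Int) + d) == 1)
      = pvDiag board R C ((R : Int) - 1 + m) := by
  unfold pvDiag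
  rw [show List.range R = List.range (R - C + m) ++ (List.range (C - m)).map ((R - C + m) + ·) from by
        rw [← List.range_add]; congr 1; omega,
      List.countP_append, List.countP_map]
  have h1 : (List.range (R - C + m)).countP
      (fun (r : Nat) => decide (0 ≤ ((R : Int) - 1 + m) - (r : Int)) && decide (((R : Int) - 1 + m) - (r : Int) < (C : Int)) && (pvB_cell board r (((R : Int) - 1 + m) - (r : Int)) == 1)) = 0 := by
    rw [List.countP_eq_zero]
    intro a ha
    rw [List.mem_range] at ha
    simp only [Bool.and_eq_true, decide_eq_true_eq, not_and]
    intro h; exfalso; omega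
  rw [h1, Nat.zero_add]
  rw [← List.countP_reverse, List.range_eq_range', List.reverse_range', List.countP_map,
      ← List.range_eq_range']
  apply List.countP_congr
  intro i hi
  rw [List.mem_range] at hi
  have e1 : ((0 + (C - m) - 1 - i : Nat) : Int) = (C : Int) - (m : Int) - 1 - (i : Int) := by omega
  simp only [Function.comp_apply]
  have ha : (R : Int) - 1 - ((0 + (C - m) - 1 - i : Nat) : Int) = (R : Int) - (C : Int) + (m : Int) + (i : Int) := by
    rw [e1]; ring
  have hb : (m : Int) + ((0 + (C - m) - 1 - i : Nat) : Int) = (C : Int) - 1 - (i : Int) := by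
    rw [e1]; ring
  rw [ha, hb]
  have hc : ((R - C + m + i : Nat) : Int) = (R : Int) - (C : Int) + (m : Int) + (i : Int) := by omega
  simp only [Bool.and_eq_true, decide_eq_true_eq]
  constructor
  · intro h
    refine ⟨⟨by push_cast; omega, by push_cast; omega⟩, ?_⟩
    rw [hc, show ((R : Int) - 1 + (m : Int)) - ((R : Int) - (C : Int) + (m : Int) + (i : Int)) = (C : Int) - 1 - (i : Int) from by ring]
    exact h
  · rintro ⟨_, h⟩
    rw [hc, show ((R : Int) - 1 + (m : Int)) - ((R : Int) - (C : Int) + (m : Int) + (i : Int)) = (C : Int) - 1 - (i : Int) from by ring] at h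
    exact h

lemma a_iff (board : List (List Int))
    (hCR : (PySem.List.pyGetD board 0 []).length ≤ board.length) :
    multipleQueensOnRightDiagonals board = true ↔
      ((∃ m : Nat, m < (PySem.List.pyGetD board 0 []).length ∧
          2 ≤ pvDiag board board.length (PySem.List.pyGetD board 0 []).length (m : Int)) ∨
       (∃ m : Nat, m < (PySem.List.pyGetD board 0 []).length ∧
          2 ≤ pvDiag board board.length (PySem.List.pyGetD board 0 []).length ((board.length : Int) - 1 + m))) := by
  simp only [multipleQueensOnRightDiagonals]
  rw [show PySem.List.enumerate [(-1 : Int), 1] = [((0 : Int), (-1 : Int)), ((1 : Int), (1 : Int))] from by decide]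
  simp only [List.any_cons, List.any_nil, Bool.or_false, PySem.List.pyGetD_ofNat']
  simp only [List.getD_cons_zero, List.getD_cons_succ, beq_self_eq_true, if_true,
    show ((1 : Int) == -1) = false from by decide, mul_one, mul_neg_one,
    zero_add, ← sub_eq_add_neg, Bool.false_eq_true, if_false]
  rw [show (board.getD 0 [] : List Int) = PySem.List.pyGetD board 0 [] from
        (PySem.List.pyGetD_ofNat' board 0 []).symm]
  have cnt0 : ∀ m : Nat, m < (PySem.List.pyGetD board 0 []).length →
      List.foldl (fun count d => if (pvA_cell board d ((m : Int) - d) == 1) = true then count + 1 else count) 0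
        (PySem.List.pyRange 0 ((m : Int) + 1)) = (pvDiag board board.length (PySem.List.pyGetD board 0 []).length (m : Int) : Int) := by
    intro m hm
    rw [PySem.List.foldl_count_if, zero_add,
        show ((m : Int) + 1) = ((m + 1 : Nat) : Int) from by push_cast; ring,
        PySem.List.pyRange_zero_natCast, List.countP_map,
        ← diag_low board board.length (PySem.List.pyGetD board 0 []).length m hm hCR]
    rfl
  have cnt1 : ∀ m : Nat, m < (PySem.List.pyGetD board 0 []).length →
      List.foldl (fun count d => if (pvA_cell board ((board.length : Int) - 1 - d) ((m : Int) + d) == 1) = true then count + 1 else count) 0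
        (PySem.List.pyRange 0 (((PySem.List.pyGetD board 0 []).length : Int) - (m : Int))) = (pvDiag board board.length (PySem.List.pyGetD board 0 []).length ((board.length : Int) - 1 + (m : Int)) : Int) := by
    intro m hm
    rw [PySem.List.foldl_count_if, zero_add,
        show (((PySem.List.pyGetD board 0 []).length : Int) - (m : Int)) = (((PySem.List.pyGetD board 0 []).length - m : Nat) : Int) from by push_cast [Nat.cast_sub hm.le]; ring,
        PySem.List.pyRange_zero_natCast, List.countP_map,
        ← diag_high board board.length (PySem.List.pyGetD board 0 []).length m hm hCR]
    rfl
  rw [Bool.or_eq_true, List.any_eq_true, List.any_eq_true]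
  constructor
  · rintro (⟨c, hcmem, hc⟩ | ⟨c, hcmem, hc⟩) <;>
      obtain ⟨hc0, hcn⟩ := PySem.List.mem_pyRange_one.mp hcmem
    · lift c to Nat using hc0 with m
      rw [cnt0 m (by exact_mod_cast hcn)] at hc
      simp only [decide_eq_true_eq] at hc
      exact Or.inl ⟨m, by exact_mod_cast hcn, by exact_mod_cast hc⟩
    · lift c to Nat using hc0 with m
      rw [cnt1 m (by exact_mod_cast hcn)] at hc
      simp only [decide_eq_true_eq] at hc
      exact Or.inr ⟨m, by exact_mod_cast hcn, by exact_mod_cast hc⟩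
  · rintro (⟨m, hm, h⟩ | ⟨m, hm, h⟩)
    · refine Or.inl ⟨(m : Int), PySem.List.mem_pyRange_one.mpr ⟨by positivity, by exact_mod_cast hm⟩, ?_⟩
      rw [cnt0 m hm]
      simp only [decide_eq_true_eq]
      exact_mod_cast h
    · refine Or.inr ⟨(m : Int), PySem.List.mem_pyRange_one.mpr ⟨by positivity, by exact_mod_cast hm⟩, ?_⟩
      rw [cnt1 m hm]
      simp only [decide_eq_true_eq]
      exact_mod_cast h

lemma zipIdx_countP (C s : Nat) :
    ∀ (l : List (List Int)) (k : Nat),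
      (List.zipIdx l k).countP (fun p => decide (p.2 ≤ s ∧ s - p.2 < C) && (p.1.getD (s - p.2) 0 == 1)) =
        (List.range l.length).countP
          (fun r => decide (k + r ≤ s ∧ s - (k + r) < C) && ((l.getD r []).getD (s - (k + r)) 0 == 1)) := by
  intro l
  induction l with
  | nil => intro k; rfl
  | cons x xs ih =>
    intro k
    rw [List.zipIdx_cons, List.countP_cons, List.length_cons, List.range_succ_eq_map,
        List.countP_cons, List.countP_map, ih (k + 1)]
    have : ((fun r => decide (k + r ≤ s ∧ s - (k + r) < C) &&
          (((x :: xs).getD r []).getD (s - (k + r)) 0 == 1)) ∘ (fun i => i + 1))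
        = fun r => decide (k + 1 + r ≤ s ∧ s - (k + 1 + r) < C) && ((xs.getD r []).getD (s - (k + 1 + r)) 0 == 1) := by
      funext r
      simp only [Function.comp_apply, List.getD_cons_succ]
      rw [show k + (r + 1) = k + 1 + r from by omega]
    rw [this]
    simp only [List.getD_cons_zero, Nat.add_zero]

lemma pvDDiag_eq (board : List (List Int)) (s : Nat) :
    pvDDiag board (PySem.List.pyGetD board 0 []).length s
      = pvDiag board board.length (PySem.List.pyGetD board 0 []).length (s : Int) := by
  unfold pvDDiag pvDiag
  rw [zipIdx_countP (PySem.List.pyGetD board 0 []).length s board 0]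
  apply List.countP_congr
  intro r _
  simp only [Nat.zero_add, Bool.and_eq_true, decide_eq_true_eq]
  constructor
  · rintro ⟨⟨h1, h2⟩, h3⟩
    refine ⟨⟨by omega, by omega⟩, ?_⟩
    rw [show (s : Int) - (r : Int) = ((s - r : Nat) : Int) from by omega]
    unfold pvB_cell
    rw [PySem.List.pyGetD_natCast, PySem.List.pyGetD_natCast]
    exact h3
  · rintro ⟨⟨h1, h2⟩, h3⟩
    refine ⟨⟨by omega, by omega⟩, ?_⟩
    rw [show (s : Int) - (r : Int) = ((s - r : Nat) : Int) from by omega] at h3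
    unfold pvB_cell at h3
    rw [PySem.List.pyGetD_natCast, PySem.List.pyGetD_natCast] at h3
    exact h3

lemma pvDiag_bounds (board : List (List Int)) (R C : Nat) (s : Int) (h : 1 ≤ pvDiag board R C s) :
    0 ≤ s ∧ s < (R : Int) + (C : Int) - 1 := by
  unfold pvDiag at h
  obtain ⟨r, hr, hp⟩ := List.countP_pos_iff.mp h
  rw [List.mem_range] at hr
  simp only [Bool.and_eq_true, decide_eq_true_eq] at hp
  omega
lemma pv_eq_of_not_D (board : List (List Int))
    (hpre : Pre_multipleQueensOnRightDiagonals board)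
    (hnd : ¬ D_multipleQueensOnRightDiagonals board) :
    multipleQueensOnRightDiagonals board = multipleQueensOnRightDiagonals_alt board := by
  obtain ⟨hne, hCR, -⟩ := hpre
  have hg : (board.getD 0 [] : List Int) = PySem.List.pyGetD board 0 [] :=
    (PySem.List.pyGetD_ofNat' board 0 []).symm
  rw [hg] at hCR
  unfold D_multipleQueensOnRightDiagonals at hnd
  rw [hg] at hnd
  simp only [] at hnd
  have hR1 : 1 ≤ board.length := List.length_pos_of_ne_nil hne
  rw [Bool.eq_iff_iff, a_iff board hCR, alt_iff board]
  constructor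
  · rintro (⟨m, hm, h⟩ | ⟨m, hm, h⟩) <;> exact ⟨_, h⟩
  · rintro ⟨s, hs⟩
    obtain ⟨h0, h1⟩ := pvDiag_bounds board board.length (PySem.List.pyGetD board 0 []).length s (by omega)
    lift s to Nat using h0 with m
    by_cases hmC : m < (PySem.List.pyGetD board 0 []).length
    · exact Or.inl ⟨m, hmC, hs⟩
    · by_cases hmR : board.length - 1 ≤ m
      · refine Or.inr ⟨m - (board.length - 1), by omega, ?_⟩
        rw [show (board.length : Int) - 1 + ((m - (board.length - 1) : Nat) : Int) = (m : Int) from by omega]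
        exact hs
      · have hmH : m ∈ (List.range (board.length + (PySem.List.pyGetD board 0 []).length)).filter
            fun s => 2 ≤ pvDDiag board (PySem.List.pyGetD board 0 []).length s := by
          rw [List.mem_filter, List.mem_range]
          exact ⟨by omega, by rw [decide_eq_true_eq, pvDDiag_eq]; exact hs⟩
        by_cases hall : ∀ s' ∈ (List.range (board.length + (PySem.List.pyGetD board 0 []).length)).filter
            (fun s => 2 ≤ pvDDiag board (PySem.List.pyGetD board 0 []).length s),
            (PySem.List.pyGetD board 0 []).length ≤ s' ∧ s' + 2 ≤ board.length
        · exact absurd ⟨List.ne_nil_of_mem hmH, hall⟩ hnd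
        · push_neg at hall
          obtain ⟨s', hmem, hbad⟩ := hall
          rw [List.mem_filter, List.mem_range, decide_eq_true_eq, pvDDiag_eq] at hmem
          obtain ⟨-, h2⟩ := hmem
          obtain ⟨hb0, hb1⟩ := pvDiag_bounds board board.length (PySem.List.pyGetD board 0 []).length s' (by omega)
          rcases Nat.lt_or_ge s' (PySem.List.pyGetD board 0 []).length with hsC | hsC
          · exact Or.inl ⟨s', hsC, h2⟩
          · refine Or.inr ⟨s' - (board.length - 1), by omega, ?_⟩
            rw [show (board.length : Int) - 1 + ((s' - (board.length - 1) : Nat) : Int) = (s' : Int) from by omega]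
            exact h2

lemma pv_ne_of_D (board : List (List Int))
    (hpre : Pre_multipleQueensOnRightDiagonals board)
    (hD : D_multipleQueensOnRightDiagonals board) :
    multipleQueensOnRightDiagonals board ≠ multipleQueensOnRightDiagonals_alt board := by
  obtain ⟨hne, hCR, -⟩ := hpre
  have hg : (board.getD 0 [] : List Int) = PySem.List.pyGetD board 0 [] :=
    (PySem.List.pyGetD_ofNat' board 0 []).symm
  rw [hg] at hCR
  unfold D_multipleQueensOnRightDiagonals at hD
  rw [hg] at hD
  simp only [] at hD
  have hR1 : 1 ≤ board.length := List.length_pos_of_ne_nil hne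
  obtain ⟨hHne, hall⟩ := hD
  obtain ⟨s0, hs0H⟩ := List.exists_mem_of_ne_nil _ hHne
  obtain ⟨hs0C, hs0R⟩ := hall s0 hs0H
  rw [List.mem_filter, List.mem_range, decide_eq_true_eq, pvDDiag_eq] at hs0H
  obtain ⟨-, hs02⟩ := hs0H
  have hBtrue : multipleQueensOnRightDiagonals_alt board = true :=
    (alt_iff board).mpr ⟨(s0 : Int), hs02⟩
  have hAfalse : multipleQueensOnRightDiagonals board ≠ true := by
    intro hA
    rcases (a_iff board hCR).mp hA with ⟨m, hm, h⟩ | ⟨m, hm, h⟩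
    · obtain ⟨hc, -⟩ := hall m (by
        rw [List.mem_filter, List.mem_range]
        exact ⟨by omega, by rw [decide_eq_true_eq, pvDDiag_eq]; exact h⟩)
      omega
    · obtain ⟨-, hr⟩ := hall (board.length - 1 + m) (by
        rw [List.mem_filter, List.mem_range]
        refine ⟨by omega, ?_⟩
        rw [decide_eq_true_eq, pvDDiag_eq,
            show ((board.length - 1 + m : Nat) : Int) = (board.length : Int) - 1 + (m : Int) from by omega]
        exact h)
      omega
  rw [hBtrue]
  exact hAfalse

-- ===== VERDICT (by name: the statements are the Claim_ definitions above) =====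
theorem multipleQueensOnRightDiagonals_spec : Claim_unchanged_multipleQueensOnRightDiagonals := by
  intro board _ hpre hnd
  exact pv_eq_of_not_D board hpre hnd

theorem multipleQueensOnRightDiagonals_changed : Claim_changed_multipleQueensOnRightDiagonals := by
  unfold Claim_changed_multipleQueensOnRightDiagonals; decide

theorem multipleQueensOnRightDiagonals_tight : Claim_exact_multipleQueensOnRightDiagonals := by
  intro board _ hpre hD
  exact pv_ne_of_D board hpre hD
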